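-- pv_equiv track=rewrite | github.com/schnmnn/adventofcode | 2025/day7/day7.py | trace_beams
-- ===== SOURCE A (Python) =====
-- from collections import deque
-- from typing import List, Sequence
--
-- def trace_beams(grid: List[List[str]], start_row: int, start_col: int) -> int:
--     beams = deque([(start_row + 1, start_col)])
--     splits = 0
--     seen: set[tuple[int, int]] = set()
--
--     while beams:
--         row, col = beams.popleft()
--         if (row, col) in seen:
--             continue
--         seen.add((row, col))
--
--         if row >= len(grid):
--             continue
--
--         if col < 0 or col >= len(grid[row]):
--             continue
--
--         cell = grid[row][col]
--         if cell == "^":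
--             splits += 1
--             beams.append((row + 1, col - 1))
--             beams.append((row + 1, col + 1))
--         elif cell == ".":
--             beams.append((row + 1, col))
--
--     return splits
-- ===== SOURCE B (Python) =====
-- def trace_beams(grid, start_row, start_col):
--     splits = 0
--     row = start_row + 1
--     frontier = {start_col}
--     while row < len(grid) and frontier:
--         nxt = set()
--         for col in frontier:
--             if 0 <= col < len(grid[row]):
--                 cell = grid[row][col]
--                 if cell == "^":
--                     splits += 1
--                     nxt.add(col - 1)
--                     nxt.add(col + 1)
--                 elif cell == ".":
--                     nxt.add(col)
--         frontier = nxt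
--         row += 1
--     return splits
-- ===== Notes on version B (the rewrite author's own statement) =====
-- stated objective: alternative
-- what changed: Replaced the global deque + seen-set BFS by a row-by-row sweep that keeps only the current frontier of columns as a set, exploiting that beams only move downward.
import Mathlib
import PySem

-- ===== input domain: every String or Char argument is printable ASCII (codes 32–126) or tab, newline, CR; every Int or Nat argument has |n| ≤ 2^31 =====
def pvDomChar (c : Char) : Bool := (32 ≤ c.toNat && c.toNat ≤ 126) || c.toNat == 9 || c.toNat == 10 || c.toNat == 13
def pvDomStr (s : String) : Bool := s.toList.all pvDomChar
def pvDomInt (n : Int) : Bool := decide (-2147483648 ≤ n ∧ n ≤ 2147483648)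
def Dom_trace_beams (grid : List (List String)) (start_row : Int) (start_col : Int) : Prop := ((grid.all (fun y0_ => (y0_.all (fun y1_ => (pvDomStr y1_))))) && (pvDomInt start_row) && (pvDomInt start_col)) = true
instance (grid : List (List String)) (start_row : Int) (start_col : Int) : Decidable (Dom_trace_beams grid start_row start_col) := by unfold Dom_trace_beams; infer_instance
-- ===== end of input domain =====

-- B replaces A's global deque + seen-set BFS by a row-by-row sweep carrying only the
-- current frontier of columns as a set (beams only ever move one row down), same values.

-- ===== PORT A =====
-- A's while-loop over the deque, step for step; the Nat fuel only makes the recursion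
-- structural and is an ample upper bound on the number of pops (each beam spawns at most
-- two children one row further down, rows stop at len(grid)).
def beamLoop (grid : List (List String)) : Nat → List (Int × Int) → PySem.Set (Int × Int) → Int → Int
  | 0, _, _, splits => splits
  | _ + 1, [], _, splits => splits
  | fuel + 1, (row, col) :: rest, seen, splits =>
    if PySem.Set.contains seen (row, col) then beamLoop grid fuel rest seen splits
    else
      let seen1 := PySem.Set.add seen (row, col)
      if (grid.length : Int) ≤ row then beamLoop grid fuel rest seen1 splits
      else
        -- grid[row]: Python indexing (negative wraps); none (IndexError) is excluded by Pre_
        let line := (PySem.List.pyGet? grid row).getD []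
        if col < 0 ∨ (line.length : Int) ≤ col then beamLoop grid fuel rest seen1 splits
        else
          let cell := (PySem.List.pyGet? line col).getD ""
          if cell = "^" then
            beamLoop grid fuel (rest ++ [(row + 1, col - 1), (row + 1, col + 1)]) seen1 (splits + 1)
          else if cell = "." then
            beamLoop grid fuel (rest ++ [(row + 1, col)]) seen1 splits
          else beamLoop grid fuel rest seen1 splits

def trace_beams (grid : List (List String)) (start_row : Int) (start_col : Int) : Int :=
  beamLoop grid (3 ^ (((grid.length : Int) - start_row).toNat + 2))
    [(start_row + 1, start_col)] PySem.Set.empty 0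

-- ===== PORT B =====
-- one column of B's per-row loop body: fold over the frontier
def sweepStep (line : List String) (st : Int × PySem.Set Int) (col : Int) : Int × PySem.Set Int :=
  if 0 ≤ col ∧ col < (line.length : Int) then
    let cell := (PySem.List.pyGet? line col).getD ""
    if cell = "^" then (st.1 + 1, PySem.Set.add (PySem.Set.add st.2 (col - 1)) (col + 1))
    else if cell = "." then (st.1, PySem.Set.add st.2 col)
    else st
  else st

-- B's while-loop: row increases toward len(grid), so the recursion is well-founded
def sweep (grid : List (List String)) (row : Int) (frontier : PySem.Set Int) (splits : Int) : Int :=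
  if h : row < (grid.length : Int) ∧ frontier ≠ [] then
    let line := (PySem.List.pyGet? grid row).getD []
    let st := frontier.foldl (sweepStep line) (0, PySem.Set.empty)
    sweep grid (row + 1) st.2 (splits + st.1)
  else splits
termination_by ((grid.length : Int) - row).toNat
decreasing_by omega

def trace_beams_alt (grid : List (List String)) (start_row : Int) (start_col : Int) : Int :=
  sweep grid (start_row + 1) (PySem.Set.ofList [start_col]) 0

-- ===== PRECONDITION & SPEC =====
-- Pre_ excludes exactly the inputs where Python A raises IndexError: the first beam row
-- start_row+1 below -len(grid) (out of range even after negative wraparound) with a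
-- non-negative start_col (a negative one short-circuits 'col < 0 or ...' before grid[row]).
def Pre_trace_beams (grid : List (List String)) (start_row : Int) (start_col : Int) : Prop :=
  -(grid.length : Int) ≤ start_row + 1 ∨ start_col < 0
instance (grid : List (List String)) (start_row : Int) (start_col : Int) : Decidable (Pre_trace_beams grid start_row start_col) := by unfold Pre_trace_beams; infer_instance

def pvWitness_trace_beams : List (List String) × Int × Int := ([[".", "^"], ["^", "."]], -1, 0)

def Spec_trace_beams (grid : List (List String)) (start_row : Int) (start_col : Int) (out : Int) : Prop := out = trace_beams_alt grid start_row start_col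
instance (grid : List (List String)) (start_row : Int) (start_col : Int) (out : Int) : Decidable (Spec_trace_beams grid start_row start_col out) := by unfold Spec_trace_beams; infer_instance

-- ===== CLAIM (what is proved, stated in full; the proofs are below) =====
def Claim_equal_trace_beams : Prop := ∀ (grid : List (List String)) (start_row : Int) (start_col : Int), Dom_trace_beams grid start_row start_col → Pre_trace_beams grid start_row start_col → Spec_trace_beams grid start_row start_col (trace_beams grid start_row start_col)

-- ===== LEMMAS AND PROOFS =====

-- proof-side mirror of A's loop body for one popped column of the current row
def rowStep (line : List String) (st : PySem.Set Int × Int × PySem.Set Int) (c : Int) :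
    PySem.Set Int × Int × PySem.Set Int :=
  if PySem.Set.contains st.1 c then st
  else
    let done := PySem.Set.add st.1 c
    if c < 0 ∨ (line.length : Int) ≤ c then (done, st.2.1, st.2.2)
    else
      let cell := (PySem.List.pyGet? line c).getD ""
      if cell = "^" then (done, st.2.1 + 1, PySem.Set.add (PySem.Set.add st.2.2 (c - 1)) (c + 1))
      else if cell = "." then (done, st.2.1, PySem.Set.add st.2.2 c)
      else (done, st.2.1, st.2.2)

-- value of A's loop from a mid-row state (pending cols cs, dedup state, counter, next frontier)
def midVal (grid : List (List String)) (row : Int) (cs : List Int)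
    (st : PySem.Set Int × Int × PySem.Set Int) (base : Int) : Int :=
  if (grid.length : Int) ≤ row then base
  else
    let line := (PySem.List.pyGet? grid row).getD []
    let fin := cs.foldl (rowStep line) st
    sweep grid (row + 1) fin.2.2 (base + fin.2.1)

-- the first occurrences in cs that are not in done (the columns rowStep actually processes)
def filterNew (done : PySem.Set Int) : List Int → List Int
  | [] => []
  | c :: cs => if c ∈ done then filterNew done cs else c :: filterNew (PySem.Set.add done c) cs

lemma rowStep_new (line : List String) (s : PySem.Set Int) (k : Int) (nx : PySem.Set Int)
    (c : Int) (hc : c ∉ s) :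
    rowStep line (s, k, nx) c = (PySem.Set.add s c, sweepStep line (k, nx) c) := by
  have h1 : ¬ (PySem.Set.contains s c = true) := by simp [hc]
  by_cases hb : c < 0 ∨ ((line.length : Int)) ≤ c
  · have hb' : ¬ (0 ≤ c ∧ c < (line.length : Int)) := by omega
    simp [rowStep, sweepStep, hb, hb', hc]
  · have hb' : (0 ≤ c ∧ c < (line.length : Int)) := by omega
    simp only [rowStep, sweepStep, if_neg h1, if_neg hb, if_pos hb']
    split_ifs <;> rfl

lemma foldl_rowStep_snd (line : List String) :
    ∀ (cs : List Int) (st : PySem.Set Int × Int × PySem.Set Int),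
    (cs.foldl (rowStep line) st).2 = (filterNew st.1 cs).foldl (sweepStep line) st.2 := by
  intro cs
  induction cs with
  | nil => intro st; simp [filterNew]
  | cons c cs ih =>
    intro st
    obtain ⟨s, k, nx⟩ := st
    simp only [List.foldl_cons, filterNew]
    by_cases hc : c ∈ s
    · rw [if_pos hc]
      have hr : rowStep line (s, k, nx) c = (s, k, nx) := by simp [rowStep, hc]
      rw [hr]; exact ih (s, k, nx)
    · rw [if_neg hc, rowStep_new line s k nx c hc]
      simpa using ih (PySem.Set.add s c, sweepStep line (k, nx) c)

lemma update_eq_append_filterNew :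
    ∀ (cs : List Int) (done : PySem.Set Int),
    PySem.Set.update done cs = done ++ filterNew done cs := by
  intro cs
  induction cs with
  | nil => intro done; simp [filterNew, PySem.Set.update_nil]
  | cons c cs ih =>
    intro done
    rw [PySem.Set.update_cons, filterNew]
    by_cases hc : c ∈ done
    · rw [PySem.Set.add_of_mem hc, if_pos hc, ih]
    · rw [if_neg hc, ih (PySem.Set.add done c), PySem.Set.add_of_not_mem hc]
      simp

lemma filterNew_nil_eq (cs : List Int) : filterNew PySem.Set.empty cs = PySem.Set.ofList cs := by
  have h := update_eq_append_filterNew cs PySem.Set.empty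
  rw [show (PySem.Set.empty : PySem.Set Int) = [] from rfl] at h ⊢
  rw [PySem.Set.update_nil_left] at h
  simpa using h.symm

lemma midVal_cons (grid : List (List String)) (row : Int) (c : Int) (cs : List Int)
    (st : PySem.Set Int × Int × PySem.Set Int) (base : Int) :
    midVal grid row (c :: cs) st base
      = midVal grid row cs (rowStep ((PySem.List.pyGet? grid row).getD []) st c) base := by
  simp only [midVal, List.foldl_cons]

lemma sweep_stop (grid : List (List String)) (row : Int) (frontier : PySem.Set Int) (splits : Int)
    (h : ¬ row < (grid.length : Int)) : sweep grid row frontier splits = splits := by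
  rw [sweep]; simp [h]

lemma sweep_nil (grid : List (List String)) (row : Int) (splits : Int) :
    sweep grid row ([] : PySem.Set Int) splits = splits := by
  rw [sweep]; simp

lemma midVal_eq_sweep (grid : List (List String)) (row : Int) (cs : List Int) (base : Int) :
    midVal grid row cs (PySem.Set.empty, 0, PySem.Set.empty) base
      = sweep grid row (PySem.Set.ofList cs) base := by
  by_cases hr : (grid.length : Int) ≤ row
  · rw [sweep_stop grid row _ base (by omega)]
    simp [midVal, hr]
  · cases cs with
    | nil =>
      rw [show PySem.Set.ofList ([] : List Int) = [] from rfl, sweep_nil]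
      simp only [midVal, if_neg hr, List.foldl_nil]
      rw [show (PySem.Set.empty : PySem.Set Int) = [] from rfl, sweep_nil]; ring
    | cons c cs =>
      have hne : PySem.Set.ofList (c :: cs) ≠ [] := by
        have : c ∈ PySem.Set.ofList (c :: cs) := by simp [PySem.Set.mem_ofList]
        intro h; rw [h] at this; exact (List.not_mem_nil) this
      rw [sweep, dif_pos ⟨by omega, hne⟩]
      simp only [midVal, if_neg hr]
      have h2 := foldl_rowStep_snd ((PySem.List.pyGet? grid row).getD []) (c :: cs)
        (PySem.Set.empty, 0, PySem.Set.empty)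
      rw [filterNew_nil_eq] at h2
      rw [h2]

lemma drain (grid : List (List String)) :
    ∀ (q : List (Int × Int)) (fuel : Nat) (seen : PySem.Set (Int × Int)) (splits : Int),
    q.length ≤ fuel → (∀ p ∈ q, (grid.length : Int) ≤ p.1) →
    beamLoop grid fuel q seen splits = splits := by
  intro q
  induction q with
  | nil => intro fuel seen splits _ _; cases fuel <;> simp [beamLoop]
  | cons p q ih =>
    intro fuel seen splits hlen hall
    obtain ⟨r, c⟩ := p
    cases fuel with
    | zero => simp at hlen
    | succ f =>
      have hr : (grid.length : Int) ≤ r := hall (r, c) List.mem_cons_self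
      have hrest : ∀ p ∈ q, (grid.length : Int) ≤ p.1 := fun p hp => hall p (List.mem_cons_of_mem _ hp)
      simp only [beamLoop]
      by_cases hs : PySem.Set.contains seen (r, c)
      · rw [if_pos hs]; exact ih f seen splits (by simpa using hlen) hrest
      · rw [if_neg hs]
        simp only [if_pos hr]
        exact ih f _ splits (by simpa using hlen) hrest

lemma main_row (grid : List (List String)) :
    ∀ (μ : Nat) (row : Int) (cs ds : List Int) (done : PySem.Set Int)
      (seen : PySem.Set (Int × Int)) (base k : Int) (fuel : Nat),
    row < (grid.length : Int) → ((grid.length : Int) - row).toNat ≤ μ →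
    cs.length * 3 ^ μ + ds.length * 3 ^ (μ - 1) ≤ fuel →
    (∀ p ∈ seen, p.1 ≤ row) → (∀ x : Int, ((row, x) ∈ seen ↔ x ∈ done)) →
    beamLoop grid fuel (cs.map (fun c => (row, c)) ++ ds.map (fun c => (row + 1, c))) seen (base + k)
      = midVal grid row cs (done, k, PySem.Set.ofList ds) base := by
  intro μ
  induction μ using Nat.strong_induction_on with
  | _ μ IH =>
  intro row cs
  induction cs with
  | nil =>
    intro ds done seen base k fuel hrow hmu hfuel hseen hiff
    have hmu1 : 1 ≤ μ := by omega
    have ht : 1 ≤ 3 ^ (μ - 1) := Nat.one_le_pow _ _ (by norm_num)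
    simp only [List.map_nil, List.nil_append, midVal, List.foldl_nil, if_neg (not_le.mpr hrow)]
    by_cases h2 : row + 1 < (grid.length : Int)
    · have hmain := IH (μ - 1) (by omega) (row + 1) ds [] PySem.Set.empty seen (base + k) 0 fuel
        h2 (by omega) (by simpa using hfuel)
        (fun p hp => by have := hseen p hp; omega)
        (by
          intro x
          constructor
          · intro hx; exfalso; have h4 : row + 1 ≤ row := hseen _ hx; omega
          · intro hx; simp [PySem.Set.empty] at hx)
      simp only [List.map_nil, List.append_nil, add_zero] at hmain
      rw [hmain, show PySem.Set.ofList ([] : List Int) = PySem.Set.empty from rfl]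
      exact midVal_eq_sweep grid (row + 1) ds (base + k)
    · rw [drain grid (ds.map (fun c => (row + 1, c))) fuel seen (base + k)
        (by
          simp only [List.length_map]
          calc ds.length = ds.length * 1 := by ring
            _ ≤ ds.length * 3 ^ (μ - 1) := Nat.mul_le_mul_left _ ht
            _ ≤ fuel := by omega)
        (by
          intro p hp
          simp only [List.mem_map] at hp
          obtain ⟨a, _, rfl⟩ := hp
          have h3 : (grid.length : Int) ≤ row + 1 := by omega
          simpa using h3)]
      rw [sweep_stop grid (row + 1) _ _ (by omega)]
  | cons c cs ih =>
    intro ds done seen base k fuel hrow hmu hfuel hseen hiff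
    have hmu1 : 1 ≤ μ := by omega
    have ht : 1 ≤ 3 ^ (μ - 1) := Nat.one_le_pow _ _ (by norm_num)
    have h3mu : 3 ^ μ = 3 ^ (μ - 1) * 3 := by
      conv_lhs => rw [show μ = (μ - 1) + 1 from (Nat.succ_pred_eq_of_pos hmu1).symm]
      rw [pow_succ]
    have hlen : (c :: cs).length * 3 ^ μ = cs.length * 3 ^ μ + 3 ^ μ := by
      simp [List.length_cons]; ring
    rw [hlen] at hfuel
    cases fuel with
    | zero => exfalso; omega
    | succ f =>
    have hfuel' : cs.length * 3 ^ μ + ds.length * 3 ^ (μ - 1) + 3 ^ μ ≤ f + 1 := by omega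
    simp only [List.map_cons, List.cons_append, beamLoop]
    set L := (PySem.List.pyGet? grid row).getD [] with hL
    by_cases hsc : (row, c) ∈ seen
    · have hb : PySem.Set.contains seen (row, c) = true := by simp [hsc]
      rw [if_pos hb, midVal_cons, ← hL]
      have hcd : c ∈ done := (hiff c).mp hsc
      have hr : rowStep L (done, k, PySem.Set.ofList ds) c = (done, k, PySem.Set.ofList ds) := by
        simp [rowStep, hcd]
      rw [hr]
      exact ih ds done seen base k f hrow hmu (by omega) hseen hiff
    · have hb : ¬ (PySem.Set.contains seen (row, c) = true) := by simp [hsc]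
      rw [if_neg hb]
      simp only [if_neg (not_le.mpr hrow)]
      have hcd : c ∉ done := fun h => hsc ((hiff c).mpr h)
      have hseen1 : ∀ p ∈ PySem.Set.add seen (row, c), p.1 ≤ row := by
        intro p hp
        simp only [PySem.Set.mem_add] at hp
        rcases hp with hp | rfl
        · exact hseen p hp
        · simp
      have hiff1 : ∀ x : Int, ((row, x) ∈ PySem.Set.add seen (row, c) ↔ x ∈ PySem.Set.add done c) := by
        intro x
        simp [PySem.Set.mem_add, hiff x]
      rw [midVal_cons, ← hL, rowStep_new L done k (PySem.Set.ofList ds) c hcd]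
      by_cases hob : c < 0 ∨ (L.length : Int) ≤ c
      · rw [if_pos hob]
        have hsw : sweepStep L (k, PySem.Set.ofList ds) c = (k, PySem.Set.ofList ds) := by
          have : ¬ (0 ≤ c ∧ c < (L.length : Int)) := by omega
          simp [sweepStep, this]
        rw [hsw]
        exact ih ds (PySem.Set.add done c) (PySem.Set.add seen (row, c)) base k f hrow hmu
          (by omega) hseen1 hiff1
      · rw [if_neg hob]
        have hb2 : 0 ≤ c ∧ c < (L.length : Int) := by omega
        set cell := (PySem.List.pyGet? L c).getD "" with hcell
        by_cases hx : cell = "^"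
        · rw [if_pos hx]
          have hsw : sweepStep L (k, PySem.Set.ofList ds) c
              = (k + 1, PySem.Set.add (PySem.Set.add (PySem.Set.ofList ds) (c - 1)) (c + 1)) := by
            simp only [sweepStep, if_pos hb2, ← hcell, if_pos hx]
          rw [hsw]
          have hq : (cs.map (fun c => (row, c)) ++ ds.map (fun c => (row + 1, c)))
                ++ [(row + 1, c - 1), (row + 1, c + 1)]
              = cs.map (fun c => (row, c)) ++ (ds ++ [c - 1, c + 1]).map (fun c => (row + 1, c)) := by
            simp [List.map_append]
          rw [hq, show base + k + 1 = base + (k + 1) from by ring]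
          have hof : PySem.Set.ofList (ds ++ [c - 1, c + 1])
              = PySem.Set.add (PySem.Set.add (PySem.Set.ofList ds) (c - 1)) (c + 1) := by
            rw [show ds ++ [c - 1, c + 1] = (ds ++ [c - 1]) ++ [c + 1] from by simp,
              PySem.Set.ofList_append_singleton, PySem.Set.ofList_append_singleton]
          rw [← hof]
          refine ih (ds ++ [c - 1, c + 1]) (PySem.Set.add done c) (PySem.Set.add seen (row, c))
            base (k + 1) f hrow hmu ?_ hseen1 hiff1
          have hexp : (ds ++ [c - 1, c + 1]).length * 3 ^ (μ - 1)
              = ds.length * 3 ^ (μ - 1) + 2 * 3 ^ (μ - 1) := by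
            simp [List.length_append]; ring
          rw [hexp]; omega
        · by_cases hy : cell = "."
          · rw [if_neg hx, if_pos hy]
            have hsw : sweepStep L (k, PySem.Set.ofList ds) c
                = (k, PySem.Set.add (PySem.Set.ofList ds) c) := by
              simp only [sweepStep, if_pos hb2, ← hcell, if_neg hx, if_pos hy]
            rw [hsw]
            have hq : (cs.map (fun c => (row, c)) ++ ds.map (fun c => (row + 1, c)))
                  ++ [(row + 1, c)]
                = cs.map (fun c => (row, c)) ++ (ds ++ [c]).map (fun c => (row + 1, c)) := by
              simp [List.map_append]
            rw [hq, ← PySem.Set.ofList_append_singleton]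
            refine ih (ds ++ [c]) (PySem.Set.add done c) (PySem.Set.add seen (row, c))
              base k f hrow hmu ?_ hseen1 hiff1
            have hexp : (ds ++ [c]).length * 3 ^ (μ - 1)
                = ds.length * 3 ^ (μ - 1) + 1 * 3 ^ (μ - 1) := by
              simp [List.length_append]; ring
            rw [hexp]; omega
          · rw [if_neg hx, if_neg hy]
            have hsw : sweepStep L (k, PySem.Set.ofList ds) c = (k, PySem.Set.ofList ds) := by
              simp only [sweepStep, if_pos hb2, ← hcell, if_neg hx, if_neg hy]
            rw [hsw]
            exact ih ds (PySem.Set.add done c) (PySem.Set.add seen (row, c)) base k f hrow hmu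
              (by omega) hseen1 hiff1

-- ===== VERDICT (by name: the statement is the Claim_ definition above) =====
theorem trace_beams_spec : Claim_equal_trace_beams := by
  intro grid sr sc hdom hpre
  unfold Spec_trace_beams trace_beams trace_beams_alt
  by_cases h : sr + 1 < (grid.length : Int)
  · have hmain := main_row grid (((grid.length : Int) - (sr + 1)).toNat) (sr + 1) [sc] []
      PySem.Set.empty PySem.Set.empty 0 0 (3 ^ (((grid.length : Int) - sr).toNat + 2))
      h (le_refl _)
      (by
        simp only [List.length_cons, List.length_nil, zero_mul, add_zero, zero_add, one_mul]
        exact Nat.pow_le_pow_right (by norm_num) (by omega))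
      (by intro p hp; simp [PySem.Set.empty] at hp)
      (by intro x; simp [PySem.Set.empty])
    simp only [List.map_cons, List.map_nil, List.append_nil, add_zero] at hmain
    rw [hmain, show PySem.Set.ofList ([] : List Int) = PySem.Set.empty from rfl]
    exact midVal_eq_sweep grid (sr + 1) [sc] 0
  · rw [drain grid [(sr + 1, sc)] _ PySem.Set.empty 0
      (by
        have : 1 ≤ 3 ^ (((grid.length : Int) - sr).toNat + 2) := Nat.one_le_pow _ _ (by norm_num)
        simpa using this)
      (by
        intro p hp
        simp only [List.mem_singleton] at hp
        subst hp
        have h3 : (grid.length : Int) ≤ sr + 1 := by omega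
        simpa using h3)]
    rw [sweep_stop grid (sr + 1) _ 0 (by omega)]
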